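-- pv_equiv track=rewrite | github.com/rkd7997/Python | second.py | get_processed_number
-- ===== SOURCE A (Python) =====
-- def get_processed_number(number):
--     preprocess_dict = {
--         "1":"일",
--         "2":"이",
--         "3":"삼",
--         "4":"사",
--         "5":"오",
--         "6":"육",
--         "7":"칠",
--         "8":"팔",
--         "9":"구",
--     }
--
--     for key, value in preprocess_dict.items():
--         number = number.replace(key, value)
--
--     return number
-- ===== SOURCE B (Python) =====
-- def get_processed_number(number):
--     mapping = {
--         "1": "일",
--         "2": "이",
--         "3": "삼",
--         "4": "사",
--         "5": "오",
--         "6": "육",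
--         "7": "칠",
--         "8": "팔",
--         "9": "구",
--     }
--     return "".join(mapping.get(ch, ch) for ch in number)
-- ===== Notes on version B (the rewrite author's own statement) =====
-- stated objective: simpler
-- what changed: Nine sequential full-string .replace passes are replaced by a single pass over the characters, joining mapping.get(ch, ch); correct because the Korean replacement characters are never digit keys.
import Mathlib
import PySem

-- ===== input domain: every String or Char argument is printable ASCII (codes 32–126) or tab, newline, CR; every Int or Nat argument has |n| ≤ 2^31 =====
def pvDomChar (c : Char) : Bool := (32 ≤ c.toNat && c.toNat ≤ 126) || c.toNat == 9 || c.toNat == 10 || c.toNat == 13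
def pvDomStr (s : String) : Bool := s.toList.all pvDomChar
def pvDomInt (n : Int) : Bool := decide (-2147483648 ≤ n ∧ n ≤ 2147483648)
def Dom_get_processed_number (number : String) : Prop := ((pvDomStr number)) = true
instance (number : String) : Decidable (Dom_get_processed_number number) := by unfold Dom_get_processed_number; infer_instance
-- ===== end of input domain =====

-- B replaces nine sequential full-string replace passes with one pass over the characters (simpler).

-- ===== PORT A =====
-- the dict literal's items in insertion order, as A iterates them
def pvPairsA : List (String × String) :=
  [("1", "일"), ("2", "이"), ("3", "삼"), ("4", "사"), ("5", "오"),
   ("6", "육"), ("7", "칠"), ("8", "팔"), ("9", "구")]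

def get_processed_number (number : String) : String :=
  pvPairsA.foldl (fun n kv => PySem.Str.replace n kv.1 kv.2) number

-- ===== PORT B =====
-- Source B's dict literal (Char keys: Python's len-1 strings from iterating a str)
def pvKoDict : PySem.Dict Char String :=
  ⟨[('1', "일"), ('2', "이"), ('3', "삼"), ('4', "사"), ('5', "오"),
    ('6', "육"), ('7', "칠"), ('8', "팔"), ('9', "구")]⟩

def get_processed_number_alt (number : String) : String :=
  PySem.Str.join "" (number.toList.map (fun ch => pvKoDict.getD ch (String.ofList [ch])))

-- ===== PRECONDITION & SPEC =====
def Spec_get_processed_number (number : String) (out : String) : Prop := out = get_processed_number_alt number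
instance (number : String) (out : String) : Decidable (Spec_get_processed_number number out) := by unfold Spec_get_processed_number; infer_instance

-- ===== CLAIM (what is proved, stated in full; the proofs are below) =====
def Claim_equal_get_processed_number : Prop := ∀ (number : String), Dom_get_processed_number number → Spec_get_processed_number number (get_processed_number number)

-- ===== LEMMAS AND PROOFS =====

-- B's per-character mapping, as a Char function
def pvKo (c : Char) : Char :=
  if c = '1' then '일' else if c = '2' then '이' else if c = '3' then '삼' else
  if c = '4' then '사' else if c = '5' then '오' else if c = '6' then '육' else
  if c = '7' then '칠' else if c = '8' then '팔' else if c = '9' then '구' else c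

theorem pv_go_single (a b : Char) :
    ∀ (fuel : Nat) (l acc : List Char), l.length ≤ fuel →
      PySem.Chars.replace.go [a] [b] fuel l acc =
        acc.reverse ++ l.map (fun c => if c = a then b else c) := by
  intro fuel
  induction fuel with
  | zero =>
    intro l acc h
    have : l = [] := List.eq_nil_of_length_eq_zero (Nat.le_zero.mp h)
    subst this
    simp [PySem.Chars.replace.go]
  | succ n ih =>
    intro l acc h
    cases l with
    | nil => simp [PySem.Chars.replace.go]
    | cons c t =>
      simp only [PySem.Chars.replace.go]
      by_cases hc : c = a
      · subst hc
        rw [if_pos (by simp [List.isPrefixOf])]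
        simp only [List.length_singleton, List.drop_succ_cons, List.drop_zero,
          List.reverse_singleton, List.singleton_append]
        rw [ih t (b :: acc) (by simpa using Nat.le_of_succ_le_succ h)]
        simp
      · rw [if_neg (by simp only [List.isPrefixOf, Bool.and_true,
            beq_iff_eq]; exact fun hh => hc hh.symm)]
        rw [ih t (c :: acc) (by simpa using Nat.le_of_succ_le_succ h)]
        simp [hc]

theorem pv_replace_single (a b : Char) (l : List Char) :
    PySem.Chars.replace l [a] [b] = l.map (fun c => if c = a then b else c) := by
  simp only [PySem.Chars.replace, List.isEmpty]
  rw [pv_go_single a b l.length l [] (le_refl _)]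
  simp

theorem pv_getD_char (ch : Char) :
    (pvKoDict.getD ch (String.ofList [ch])).toList = [pvKo ch] := by
  simp only [pvKoDict, PySem.Dict.getD, PySem.Dict.get?, List.find?, pvKo]
  by_cases h1 : ch = '1'; · subst h1; simp
  by_cases h2 : ch = '2'; · subst h2; simp
  by_cases h3 : ch = '3'; · subst h3; simp
  by_cases h4 : ch = '4'; · subst h4; simp
  by_cases h5 : ch = '5'; · subst h5; simp
  by_cases h6 : ch = '6'; · subst h6; simp
  by_cases h7 : ch = '7'; · subst h7; simp
  by_cases h8 : ch = '8'; · subst h8; simp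
  by_cases h9 : ch = '9'; · subst h9; simp
  have e1 : ('1' == ch) = false := beq_eq_false_iff_ne.mpr (fun h => h1 h.symm)
  have e2 : ('2' == ch) = false := beq_eq_false_iff_ne.mpr (fun h => h2 h.symm)
  have e3 : ('3' == ch) = false := beq_eq_false_iff_ne.mpr (fun h => h3 h.symm)
  have e4 : ('4' == ch) = false := beq_eq_false_iff_ne.mpr (fun h => h4 h.symm)
  have e5 : ('5' == ch) = false := beq_eq_false_iff_ne.mpr (fun h => h5 h.symm)
  have e6 : ('6' == ch) = false := beq_eq_false_iff_ne.mpr (fun h => h6 h.symm)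
  have e7 : ('7' == ch) = false := beq_eq_false_iff_ne.mpr (fun h => h7 h.symm)
  have e8 : ('8' == ch) = false := beq_eq_false_iff_ne.mpr (fun h => h8 h.symm)
  have e9 : ('9' == ch) = false := beq_eq_false_iff_ne.mpr (fun h => h9 h.symm)
  simp [e1, e2, e3, e4, e5, e6, e7, e8, e9, h1, h2, h3, h4, h5, h6, h7, h8, h9]


-- ===== VERDICT (by name: the statement is the Claim_ definition above) =====
theorem pv_map_eq (l : List Char) :
    List.map (fun c => if c = '9' then '구' else c) (List.map (fun c => if c = '8' then '팔' else c) (List.map (fun c => if c = '7' then '칠' else c) (List.map (fun c => if c = '6' then '육' else c) (List.map (fun c => if c = '5' then '오' else c) (List.map (fun c => if c = '4' then '사' else c) (List.map (fun c => if c = '3' then '삼' else c) (List.map (fun c => if c = '2' then '이' else c) (List.map (fun c => if c = '1' then '일' else c) (l)))))))))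
      = l.map pvKo := by
  simp only [List.map_map]
  refine List.map_congr_left (fun c _ => ?_)
  by_cases h1 : c = '1'; · subst h1; simp [pvKo]
  by_cases h2 : c = '2'; · subst h2; simp [pvKo]
  by_cases h3 : c = '3'; · subst h3; simp [pvKo]
  by_cases h4 : c = '4'; · subst h4; simp [pvKo]
  by_cases h5 : c = '5'; · subst h5; simp [pvKo]
  by_cases h6 : c = '6'; · subst h6; simp [pvKo]
  by_cases h7 : c = '7'; · subst h7; simp [pvKo]
  by_cases h8 : c = '8'; · subst h8; simp [pvKo]
  by_cases h9 : c = '9'; · subst h9; simp [pvKo]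
  simp [pvKo, h1, h2, h3, h4, h5, h6, h7, h8, h9]

theorem get_processed_number_spec : Claim_equal_get_processed_number := by
  intro number _
  unfold Spec_get_processed_number
  have hA : (get_processed_number number).toList = number.toList.map pvKo := by
    simp only [get_processed_number, pvPairsA, List.foldl_cons, List.foldl_nil,
      PySem.Str.toList_replace]
    rw [show ("1" : String).toList = ['1'] from by decide, show ("일" : String).toList = ['일'] from by decide,
        show ("2" : String).toList = ['2'] from by decide, show ("이" : String).toList = ['이'] from by decide,
        show ("3" : String).toList = ['3'] from by decide, show ("삼" : String).toList = ['삼'] from by decide,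
        show ("4" : String).toList = ['4'] from by decide, show ("사" : String).toList = ['사'] from by decide,
        show ("5" : String).toList = ['5'] from by decide, show ("오" : String).toList = ['오'] from by decide,
        show ("6" : String).toList = ['6'] from by decide, show ("육" : String).toList = ['육'] from by decide,
        show ("7" : String).toList = ['7'] from by decide, show ("칠" : String).toList = ['칠'] from by decide,
        show ("8" : String).toList = ['8'] from by decide, show ("팔" : String).toList = ['팔'] from by decide,
        show ("9" : String).toList = ['9'] from by decide, show ("구" : String).toList = ['구'] from by decide]
    simp only [pv_replace_single]
    rw [pv_map_eq]
  have hB : (get_processed_number_alt number).toList = number.toList.map pvKo := by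
    simp only [get_processed_number_alt, PySem.Str.toList_join]
    rw [show ("" : String).toList = [] from by decide]
    rw [List.map_map]
    have : (String.toList ∘ fun ch => pvKoDict.getD ch (String.ofList [ch]))
        = fun ch => [pvKo ch] := funext (fun ch => pv_getD_char ch)
    rw [this]
    have : (fun ch => [pvKo ch]) = (fun c => [c]) ∘ pvKo := rfl
    rw [this, ← List.map_map]
    exact PySem.Chars.join_nil_singletons _
  have := hA.trans hB.symm
  exact String.toList_inj.mp this
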